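-- pv_equiv track=rewrite | github.com/GCB3220/homework | python2/z_task_6/task_6_3_试验.py | ss_count
-- ===== SOURCE A (Python) =====
-- def ss_count(ss_seq: str):
--     shorted_ss = ''
--     for letter in ss_seq:
--         if shorted_ss == '' or letter != shorted_ss[-1]:
--             shorted_ss += letter
--     hlx_count = shorted_ss.count('H')
--     sht_count = shorted_ss.count('S')
--     return [hlx_count, sht_count]
-- ===== SOURCE B (Python) =====
-- def ss_count(ss_seq: str):
--     prev = None
--     h = 0
--     s = 0
--     for letter in ss_seq:
--         if letter != prev:
--             if letter == 'H':
--                 h += 1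
--             elif letter == 'S':
--                 s += 1
--             prev = letter
--     return [h, s]
-- ===== Notes on version B (the rewrite author's own statement) =====
-- stated objective: simpler
-- what changed: Counts run starts directly in one pass with a prev variable and two counters, instead of building an intermediate deduplicated string and scanning it twice with .count.
import Mathlib
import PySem

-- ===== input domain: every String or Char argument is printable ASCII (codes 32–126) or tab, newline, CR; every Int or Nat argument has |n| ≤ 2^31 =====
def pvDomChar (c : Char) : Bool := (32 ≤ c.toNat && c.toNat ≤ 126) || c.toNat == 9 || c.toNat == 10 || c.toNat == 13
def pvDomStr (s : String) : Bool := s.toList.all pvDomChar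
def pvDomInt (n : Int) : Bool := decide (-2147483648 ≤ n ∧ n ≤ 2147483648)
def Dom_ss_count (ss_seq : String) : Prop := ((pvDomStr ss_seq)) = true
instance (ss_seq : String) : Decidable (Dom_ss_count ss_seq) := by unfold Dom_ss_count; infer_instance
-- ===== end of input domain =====

-- B replaces A's intermediate deduplicated string and its two .count scans by one fused
-- pass counting run starts with a prev variable (objective: simpler).

-- ===== PORT A =====
-- the loop building shorted_ss: append letter if shorted_ss is empty or letter ≠ its last char
def ssBuild (acc : List Char) (cs : List Char) : List Char :=
  match cs with
  | [] => acc
  | c :: rest =>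
      if acc = [] ∨ acc.getLast? ≠ some c then ssBuild (acc ++ [c]) rest
      else ssBuild acc rest

def ss_count (ss_seq : String) : List Int :=
  let shorted := ssBuild [] ss_seq.toList
  -- shorted_ss.count('H') / ('S'): single-character substring count = character count
  [(shorted.count 'H' : Int), (shorted.count 'S' : Int)]

-- ===== PORT B =====
def ssScan (prev : Option Char) (h s : Int) (cs : List Char) : Int × Int :=
  match cs with
  | [] => (h, s)
  | c :: rest =>
      if some c ≠ prev then
        ssScan (some c) (h + (if c = 'H' then 1 else 0)) (s + (if c = 'S' then 1 else 0)) rest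
      else ssScan prev h s rest

def ss_count_alt (ss_seq : String) : List Int :=
  let p := ssScan none 0 0 ss_seq.toList
  [p.1, p.2]

-- ===== PRECONDITION & SPEC =====
def Spec_ss_count (ss_seq : String) (out : List Int) : Prop := out = ss_count_alt ss_seq
instance (ss_seq : String) (out : List Int) : Decidable (Spec_ss_count ss_seq out) := by unfold Spec_ss_count; infer_instance

-- ===== CLAIM (what is proved, stated in full; the proofs are below) =====
def Claim_equal_ss_count : Prop := ∀ (ss_seq : String), Dom_ss_count ss_seq → Spec_ss_count ss_seq (ss_count ss_seq)

-- ===== LEMMAS AND PROOFS =====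
theorem ssScan_build (cs : List Char) : ∀ (acc : List Char), acc ≠ [] →
    ssScan acc.getLast? (acc.count 'H' : Int) (acc.count 'S' : Int) cs
      = (((ssBuild acc cs).count 'H' : Int), ((ssBuild acc cs).count 'S' : Int)) := by
  induction cs with
  | nil => intro acc _; simp [ssScan, ssBuild]
  | cons c rest ih =>
    intro acc hne
    by_cases hlast : acc.getLast? = some c
    · have hbuild : ssBuild acc (c :: rest) = ssBuild acc rest := by
        simp [ssBuild, hne, hlast]
      have hscan : ssScan acc.getLast? (acc.count 'H' : Int) (acc.count 'S' : Int) (c :: rest)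
          = ssScan acc.getLast? (acc.count 'H' : Int) (acc.count 'S' : Int) rest := by
        simp [ssScan, hlast]
      rw [hbuild, hscan, ih acc hne]
    · have hbuild : ssBuild acc (c :: rest) = ssBuild (acc ++ [c]) rest := by
        simp [ssBuild, hlast]
      have hscan : ssScan acc.getLast? (acc.count 'H' : Int) (acc.count 'S' : Int) (c :: rest)
          = ssScan (some c) ((acc.count 'H' : Int) + (if c = 'H' then 1 else 0))
              ((acc.count 'S' : Int) + (if c = 'S' then 1 else 0)) rest := by
        simp [ssScan, Ne.symm hlast]
      have key := ih (acc ++ [c]) (by simp)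
      have hl : (acc ++ [c]).getLast? = some c := by simp
      have hH : (((acc ++ [c]).count 'H' : Nat) : Int)
          = (acc.count 'H' : Int) + (if c = 'H' then 1 else 0) := by
        simp only [List.count_append, List.count_singleton, beq_iff_eq]
        split_ifs <;> push_cast <;> ring
      have hS : (((acc ++ [c]).count 'S' : Nat) : Int)
          = (acc.count 'S' : Int) + (if c = 'S' then 1 else 0) := by
        simp only [List.count_append, List.count_singleton, beq_iff_eq]
        split_ifs <;> push_cast <;> ring
      rw [hl, hH, hS] at key
      rw [hbuild, hscan, key]

-- ===== VERDICT (by name: the statement is the Claim_ definition above) =====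
theorem ss_count_spec : Claim_equal_ss_count := by
  intro ss _
  unfold Spec_ss_count ss_count ss_count_alt
  cases hcs : ss.toList with
  | nil => simp [ssBuild, ssScan]
  | cons c rest =>
    have h1 : ssBuild [] (c :: rest) = ssBuild [c] rest := by simp [ssBuild]
    have h2 : ssScan none 0 0 (c :: rest)
        = ssScan (some c) (if c = 'H' then 1 else 0) (if c = 'S' then 1 else 0) rest := by
      simp [ssScan]
    have key := ssScan_build rest [c] (by simp)
    rw [h1, h2]
    simp only [List.getLast?_singleton, List.count_singleton, beq_iff_eq,
      apply_ite (fun n : Nat => (n : Int)), Nat.cast_one, Nat.cast_zero] at key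
    simp only [key]
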